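-- pv_equiv track=rewrite | github.com/TheMostKnown/Mozi_ciphres | project_1.py | req_afin_decode
-- ===== SOURCE A (Python) =====
-- def find_reverse(a, m):
--     rev = 0
--     while ((rev*a) % m != 1):
--         rev += 1
--     return rev
--
-- def req_afin_decode(phrase, a1, a2, b1, b2, alphabet):
--     ans = ''
--     for i in range(len(phrase)):
--         if i == 0:
--             a = a1
--             b = b1
--         elif i == 1:
--             a = a2
--             b = b2
--         else:
--             a = (a1 * a2) % len(alphabet)
--             b = (b1 + b2) % len(alphabet)
--             a1, a2 = a2, a
--             b1, b2 = b2, b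
--
--         rev = find_reverse(a, len(alphabet))
--         if alphabet.find(phrase[i]) != -1:
--             ans += alphabet[rev*(alphabet.find(phrase[i]) - b) % len(alphabet)]
--         else:
--             ans += phrase[i]
--     return ans
-- ===== SOURCE B (Python) =====
-- def _egcd(a, b):
--     # returns (g, x, y) with a*x + b*y = g = gcd(a, b)
--     if a == 0:
--         return (b, 0, 1)
--     g, x, y = _egcd(b % a, a)
--     return (g, y - (b // a) * x, x)
--
-- def _modinv(a, m):
--     g, x, _ = _egcd(a % m, m)
--     if g != 1:
--         raise ValueError("not invertible")
--     return x % m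
--
-- def req_afin_decode(phrase, a1, a2, b1, b2, alphabet):
--     m = len(alphabet)
--     index = {}
--     for k, c in enumerate(alphabet):
--         index.setdefault(c, k)
--     out = []
--     for i in range(len(phrase)):
--         if i == 0:
--             a, b = a1, b1
--         elif i == 1:
--             a, b = a2, b2
--         else:
--             a = (a1 * a2) % m
--             b = (b1 + b2) % m
--             a1, a2 = a2, a
--             b1, b2 = b2, b
--         ch = phrase[i]
--         j = index.get(ch)
--         if j is None:
--             out.append(ch)
--         else:
--             out.append(alphabet[_modinv(a, m) * (j - b) % m])
--     return ''.join(out)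
-- ===== Notes on version B (the rewrite author's own statement) =====
-- stated objective: faster
-- what changed: B replaces A's brute-force search for the modular inverse (increment rev until rev*a % m == 1) by an extended-Euclid modular inverse, replaces the per-character alphabet.find scan by a first-occurrence index dict built once, and joins a list of pieces instead of repeated string concatenation.
import Mathlib
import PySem

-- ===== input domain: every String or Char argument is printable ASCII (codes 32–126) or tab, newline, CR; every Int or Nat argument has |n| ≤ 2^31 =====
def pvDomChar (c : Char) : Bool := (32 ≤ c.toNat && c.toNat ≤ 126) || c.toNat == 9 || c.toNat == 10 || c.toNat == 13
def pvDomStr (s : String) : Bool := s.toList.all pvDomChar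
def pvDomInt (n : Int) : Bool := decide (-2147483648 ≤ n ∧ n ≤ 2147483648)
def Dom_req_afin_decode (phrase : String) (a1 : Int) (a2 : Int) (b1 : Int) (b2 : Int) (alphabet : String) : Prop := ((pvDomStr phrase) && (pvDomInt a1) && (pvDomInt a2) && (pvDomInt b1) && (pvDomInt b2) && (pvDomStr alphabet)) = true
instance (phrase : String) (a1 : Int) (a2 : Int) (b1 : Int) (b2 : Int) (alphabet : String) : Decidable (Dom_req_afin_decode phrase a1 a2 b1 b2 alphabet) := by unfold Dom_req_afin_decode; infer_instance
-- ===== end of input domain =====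

-- B computes the modular inverse by extended Euclid instead of A's brute-force search, looks characters up in
-- a first-occurrence index dict instead of scanning the alphabet with find, and joins pieces instead of += on
-- a string; proved to return A's exact value on every input where A terminates (Pre_).


-- ===== PORT A =====
-- Python's `while (rev*a) % m != 1: rev += 1` made total with fuel m.toNat + 1; under Pre_ the least
-- solution rev lies below m, so the fuel is never exhausted (proved below).
def pvFindRevGo (a m : Int) : Nat → Int → Int
  | 0, rev => rev
  | f + 1, rev => if PySem.Int.mod (rev * a) m = 1 then rev else pvFindRevGo a m f (rev + 1)

def find_reverse (a m : Int) : Int := pvFindRevGo a m (m.toNat + 1) 0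

-- one iteration of A's for-loop; state = ((a1, a2, b1, b2), ans)
def pvStepA (s al : List Char) (st : (Int × Int × Int × Int) × List Char) (i : Int) :
    (Int × Int × Int × Int) × List Char :=
  let m : Int := al.length
  let A1 := st.1.1; let A2 := st.1.2.1; let B1 := st.1.2.2.1; let B2 := st.1.2.2.2
  -- ((a, b), new (a1, a2, b1, b2))
  let p : (Int × Int) × (Int × Int × Int × Int) :=
    if i = 0 then ((A1, B1), (A1, A2, B1, B2))
    else if i = 1 then ((A2, B2), (A1, A2, B1, B2))
    else
      let a := PySem.Int.mod (A1 * A2) m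
      let b := PySem.Int.mod (B1 + B2) m
      ((a, b), (A2, a, B2, b))
  let rev := find_reverse p.1.1 m
  let c := PySem.List.pyGetD s i ' '   -- phrase[i]; i comes from range(len(phrase)) so always in range
  let f := PySem.Chars.find al [c]     -- alphabet.find(phrase[i])
  if f ≠ -1 then
    -- alphabet[rev*(f - b) % m]: the index is mod m ∈ [0, m) (m > 0 since f ≠ -1), so pyGetD is exact
    (p.2, st.2 ++ [PySem.List.pyGetD al (PySem.Int.mod (rev * (f - p.1.2)) m) ' '])
  else
    (p.2, st.2 ++ [c])

def req_afin_decode (phrase : String) (a1 : Int) (a2 : Int) (b1 : Int) (b2 : Int) (alphabet : String) : String :=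
  let s := phrase.toList
  let al := alphabet.toList
  let r := (PySem.List.pyRange 0 (s.length : Int) 1).foldl (pvStepA s al) ((a1, a2, b1, b2), [])
  String.mk r.2

-- ===== PORT B =====
-- _egcd(a, b): returns (g, x, y) with a*x + b*y = g; recursion on b % a, a
def pvEgcd (a b : Int) : Int × Int × Int :=
  if h : a = 0 then (b, 0, 1)
  else
    let r := pvEgcd (PySem.Int.mod b a) a
    (r.1, r.2.2 - PySem.Int.floordiv b a * r.2.1, r.2.1)
termination_by a.natAbs
decreasing_by
  rcases lt_trichotomy a 0 with hlt | hz | hgt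
  · have := PySem.Int.mod_neg_bounds b hlt; omega
  · exact absurd hz h
  · have h1 := PySem.Int.mod_nonneg b hgt
    have h2 := PySem.Int.mod_lt b hgt
    omega

-- _modinv(a, m); on g ≠ 1 the Python raises ValueError (outside Pre_): the port's value there is unused
def pvModinv (a m : Int) : Int :=
  if (pvEgcd (PySem.Int.mod a m) m).1 ≠ 1 then 0
  else PySem.Int.mod (pvEgcd (PySem.Int.mod a m) m).2.1 m

-- index = {}; for k, c in enumerate(alphabet): index.setdefault(c, k)
def pvIndexDict (al : List Char) : PySem.Dict Char Int :=
  (PySem.List.enumerate al 0).foldl (fun d p => d.setdefault p.2 p.1) PySem.Dict.empty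

-- one iteration of B's for-loop; state = ((a1, a2, b1, b2), out) with out the list of appended pieces
def pvStepB (s al : List Char) (idx : PySem.Dict Char Int)
    (st : (Int × Int × Int × Int) × List (List Char)) (i : Int) :
    (Int × Int × Int × Int) × List (List Char) :=
  let m : Int := al.length
  let A1 := st.1.1; let A2 := st.1.2.1; let B1 := st.1.2.2.1; let B2 := st.1.2.2.2
  let p : (Int × Int) × (Int × Int × Int × Int) :=
    if i = 0 then ((A1, B1), (A1, A2, B1, B2))
    else if i = 1 then ((A2, B2), (A1, A2, B1, B2))
    else
      let a := PySem.Int.mod (A1 * A2) m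
      let b := PySem.Int.mod (B1 + B2) m
      ((a, b), (A2, a, B2, b))
  let ch := PySem.List.pyGetD s i ' '   -- phrase[i]; i in range
  match idx.get? ch with
  | none => (p.2, st.2 ++ [[ch]])
  | some j => (p.2, st.2 ++ [[PySem.List.pyGetD al (PySem.Int.mod (pvModinv p.1.1 m * (j - p.1.2)) m) ' ']])

def req_afin_decode_alt (phrase : String) (a1 : Int) (a2 : Int) (b1 : Int) (b2 : Int) (alphabet : String) : String :=
  let al := alphabet.toList
  let idx := pvIndexDict al
  let s := phrase.toList
  let r := (PySem.List.pyRange 0 (s.length : Int) 1).foldl (pvStepB s al idx) ((a1, a2, b1, b2), [])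
  String.mk r.2.flatten   -- ''.join(out)

-- ===== PRECONDITION & SPEC =====
-- Pre_ = exactly the inputs on which A terminates normally: on a nonempty phrase A needs len(alphabet) ≥ 2
-- (len 0 divides by zero, len 1 makes find_reverse loop forever) and every key a_i invertible mod the
-- length, which by the product recurrence reduces to a1 (and, when a second character exists, a2) being
-- coprime to it; otherwise find_reverse never terminates.
def Pre_req_afin_decode (phrase : String) (a1 : Int) (a2 : Int) (b1 : Int) (b2 : Int) (alphabet : String) : Prop :=
  phrase.toList = [] ∨
    (2 ≤ alphabet.toList.length ∧ Int.gcd a1 (alphabet.toList.length : Int) = 1 ∧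
      (2 ≤ phrase.toList.length → Int.gcd a2 (alphabet.toList.length : Int) = 1))
instance (phrase : String) (a1 : Int) (a2 : Int) (b1 : Int) (b2 : Int) (alphabet : String) : Decidable (Pre_req_afin_decode phrase a1 a2 b1 b2 alphabet) := by unfold Pre_req_afin_decode; infer_instance

def pvWitness_req_afin_decode : String × Int × Int × Int × Int × String := ("ab", 1, 1, 0, 0, "ab")

def Spec_req_afin_decode (phrase : String) (a1 : Int) (a2 : Int) (b1 : Int) (b2 : Int) (alphabet : String) (out : String) : Prop := out = req_afin_decode_alt phrase a1 a2 b1 b2 alphabet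
instance (phrase : String) (a1 : Int) (a2 : Int) (b1 : Int) (b2 : Int) (alphabet : String) (out : String) : Decidable (Spec_req_afin_decode phrase a1 a2 b1 b2 alphabet out) := by unfold Spec_req_afin_decode; infer_instance

-- ===== CLAIM (what is proved, stated in full; the proofs are below) =====
def Claim_equal_req_afin_decode : Prop := ∀ (phrase : String) (a1 : Int) (a2 : Int) (b1 : Int) (b2 : Int) (alphabet : String), Dom_req_afin_decode phrase a1 a2 b1 b2 alphabet → Pre_req_afin_decode phrase a1 a2 b1 b2 alphabet → Spec_req_afin_decode phrase a1 a2 b1 b2 alphabet (req_afin_decode phrase a1 a2 b1 b2 alphabet)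

-- ===== LEMMAS AND PROOFS =====

-- first-occurrence index of c in al (proof-side helper relating A's find and B's dict)
def pvIdx (c : Char) : List Char → Option Nat
  | [] => none
  | x :: xs => if x = c then some 0 else (pvIdx c xs).map (· + 1)

lemma pvIdx_none_iff (c : Char) (al : List Char) : pvIdx c al = none ↔ c ∉ al := by
  induction al with
  | nil => simp [pvIdx]
  | cons x xs ih =>
    by_cases hx : x = c
    · subst hx; simp [pvIdx]
    · simp [pvIdx, hx, Option.map_eq_none_iff, ih, List.mem_cons, Ne.symm hx]

lemma pvIdx_some_spec (c : Char) (al : List Char) (k : Nat) (h : pvIdx c al = some k) :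
    al[k]? = some c ∧ ∀ j < k, al[j]? ≠ some c := by
  induction al generalizing k with
  | nil => simp [pvIdx] at h
  | cons x xs ih =>
    by_cases hx : x = c
    · simp [pvIdx, hx] at h; subst h; simpa using hx
    · simp [pvIdx, hx] at h
      obtain ⟨k', hk', rfl⟩ := h
      obtain ⟨h1, h2⟩ := ih k' hk'
      refine ⟨by simpa using h1, ?_⟩
      intro j hj
      cases j with
      | zero => simpa using hx
      | succ j' => simpa using h2 j' (by omega)

lemma pvSingletonPrefix (c : Char) (l : List Char) : [c] <+: l ↔ l.head? = some c := by
  cases l with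
  | nil => simp
  | cons y ys => simp [List.cons_prefix_cons, eq_comm]

lemma find_singleton_eq (al : List Char) (c : Char) :
    PySem.Chars.find al [c] = (match pvIdx c al with | none => (-1 : Int) | some k => (k : Int)) := by
  cases h : pvIdx c al with
  | none =>
    have hc : c ∉ al := (pvIdx_none_iff c al).1 h
    have hni : ¬ [c] <:+: al := fun hinf => hc (hinf.sublist.subset (List.mem_singleton_self c))
    simpa using (PySem.Chars.find_eq_neg_one_iff (s := al) (sub := [c])).2 hni
  | some k =>
    obtain ⟨h1, h2⟩ := pvIdx_some_spec c al k h
    have hdk : [c] <+: al.drop k := (pvSingletonPrefix c _).2 (by rw [List.head?_drop]; exact h1)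
    have hinf : [c] <:+: al := hdk.isInfix.trans (List.drop_suffix k al).isInfix
    have hnn : 0 ≤ PySem.Chars.find al [c] :=
      (PySem.Chars.find_nonneg_iff (s := al) (sub := [c])).2 hinf
    obtain ⟨hpre, hmin⟩ := PySem.Chars.find_spec (s := al) (sub := [c]) hnn
    have hj : al[(PySem.Chars.find al [c]).toNat]? = some c := by
      rw [← List.head?_drop]; exact (pvSingletonPrefix c _).1 hpre
    have h1' : ¬ (PySem.Chars.find al [c]).toNat < k := fun hlt => h2 _ hlt hj
    have h2' : ¬ k < (PySem.Chars.find al [c]).toNat := fun hlt => hmin k hlt hdk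
    show PySem.Chars.find al [c] = (k : Int)
    omega

-- B's dict holds the first-occurrence index
lemma pvIndexDict_get?_aux (c : Char) (al : List Char) : ∀ (s : Int) (d : PySem.Dict Char Int),
    ((PySem.List.enumerate al s).foldl (fun d p => d.setdefault p.2 p.1) d).get? c =
      ((d.get? c).elim ((pvIdx c al).map (fun k => s + k)) some) := by
  induction al with
  | nil => intro s d; cases h : d.get? c <;> simp [PySem.List.enumerate_nil, pvIdx, h]
  | cons x xs ih =>
    intro s d
    rw [PySem.List.enumerate_cons]
    simp only [List.foldl_cons]
    rw [ih (s + 1) (d.setdefault x s)]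
    by_cases hx : x = c
    · rw [hx, PySem.Dict.get?_setdefault_self d c s]
      cases h : d.get? c with
      | none => simp [h, pvIdx, hx]
      | some v => simp [h, pvIdx, hx]
    · have hcx : c ≠ x := fun e => hx e.symm
      rw [PySem.Dict.get?_setdefault_of_ne d s hcx]
      cases h : d.get? c with
      | none =>
        simp only [h, Option.elim]
        cases hkk : pvIdx c xs with
        | none => simp [pvIdx, hx, hkk]
        | some k => simp [pvIdx, hx, hkk]; ring
      | some v => simp [h]

lemma pvIndexDict_get? (c : Char) (al : List Char) :
    (pvIndexDict al).get? c = (pvIdx c al).map (fun k => (k : Int)) := by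
  rw [pvIndexDict, pvIndexDict_get?_aux]
  simp [PySem.Dict.get?_empty]

-- gcd facts
lemma pvGcd_mod (a m : Int) (hm : 0 < m) : Int.gcd (PySem.Int.mod a m) m = Int.gcd a m := by
  rw [PySem.Int.mod_eq_emod_of_pos hm]
  exact Int.gcd_emod a m

lemma pvGcd_mul (x y m : Int) (hx : Int.gcd x m = 1) (hy : Int.gcd y m = 1) :
    Int.gcd (x * y) m = 1 := by
  have := Nat.Coprime.mul (k := m.natAbs) hx hy
  simpa [Int.gcd, Int.natAbs_mul] using this

-- extended-Euclid correctness
lemma pvEgcd_spec (a b : Int) (ha : 0 ≤ a) (hb : 0 ≤ b) :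
    a * (pvEgcd a b).2.1 + b * (pvEgcd a b).2.2 = (pvEgcd a b).1 ∧
      (pvEgcd a b).1 = (Int.gcd a b : Int) := by
  rw [pvEgcd]
  by_cases h : a = 0
  · subst h
    refine ⟨by simp, ?_⟩
    simp [Int.gcd_zero_left, Int.natAbs_of_nonneg hb]
  · have hpos : 0 < a := lt_of_le_of_ne ha (Ne.symm h)
    have h1 : 0 ≤ PySem.Int.mod b a := PySem.Int.mod_nonneg b hpos
    have ih := pvEgcd_spec (PySem.Int.mod b a) a h1 ha
    simp only [h, dite_false]
    constructor
    · have hmod := ih.1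
      have hdm := PySem.Int.floordiv_mul_add_mod b a
      linear_combination hmod - (pvEgcd (PySem.Int.mod b a) a).2.1 * hdm
    · rw [ih.2, PySem.Int.mod_eq_emod_of_pos hpos]
      congr 1
      rw [Int.gcd_emod b a, Int.gcd_comm]
termination_by a.natAbs
decreasing_by
  have h2 := PySem.Int.mod_lt (a := b) hpos
  have h3 := PySem.Int.mod_nonneg (a := b) hpos
  omega

-- pvModinv is an inverse in [0, m)
lemma pvModinv_spec (a m : Int) (hm : 2 ≤ m) (hg : Int.gcd a m = 1) :
    0 ≤ pvModinv a m ∧ pvModinv a m < m ∧ PySem.Int.mod (pvModinv a m * a) m = 1 := by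
  have hmpos : (0 : Int) < m := by omega
  obtain ⟨hbez, hgcd⟩ := pvEgcd_spec (PySem.Int.mod a m) m (PySem.Int.mod_nonneg a hmpos) (by omega)
  have hone : (pvEgcd (PySem.Int.mod a m) m).1 = 1 := by
    rw [hgcd, pvGcd_mod a m hmpos, hg]; norm_num
  have hres : pvModinv a m = PySem.Int.mod (pvEgcd (PySem.Int.mod a m) m).2.1 m := by
    rw [pvModinv, hone]; norm_num
  rw [hres]
  refine ⟨PySem.Int.mod_nonneg _ hmpos, PySem.Int.mod_lt _ hmpos, ?_⟩
  rw [hone] at hbez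
  set X := (pvEgcd (PySem.Int.mod a m) m).2.1 with hX
  set Y := (pvEgcd (PySem.Int.mod a m) m).2.2 with hY
  rw [PySem.Int.mod_eq_emod_of_pos hmpos] at hbez
  rw [PySem.Int.mod_eq_emod_of_pos hmpos, PySem.Int.mod_eq_emod_of_pos hmpos]
  have e1 : X % m = X - m * (X / m) := Int.emod_def X m
  have e2 : a % m = a - m * (a / m) := Int.emod_def a m
  rw [e2] at hbez
  have e3 : X % m * a = 1 + m * (X * (a / m) - Y - (X / m) * a) := by
    rw [e1]; linear_combination hbez
  rw [e3, Int.add_mul_emod_self_left, Int.emod_eq_of_lt (by norm_num) (by omega)]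

-- the fuel search finds a solution no larger than any given one
lemma pvFindRevGo_le (a m : Int) : ∀ (f : Nat) (rev r : Int), rev ≤ r → r < rev + f →
    PySem.Int.mod (r * a) m = 1 →
    PySem.Int.mod (pvFindRevGo a m f rev * a) m = 1 ∧ rev ≤ pvFindRevGo a m f rev ∧
      pvFindRevGo a m f rev ≤ r := by
  intro f
  induction f with
  | zero => intro rev r h1 h2 _; omega
  | succ f ih =>
    intro rev r h1 h2 hr
    rw [pvFindRevGo]
    by_cases hcur : PySem.Int.mod (rev * a) m = 1
    · rw [if_pos hcur]
      exact ⟨hcur, le_refl _, h1⟩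
    · simp only [hcur, if_false]
      have hne : rev ≠ r := fun e => hcur (e ▸ hr)
      obtain ⟨p1, p2, p3⟩ := ih (rev + 1) r (by omega) (by omega) hr
      exact ⟨p1, by omega, p3⟩

-- under Pre_, A's find_reverse equals B's pvModinv
lemma find_reverse_eq_pvModinv (a m : Int) (hm : 2 ≤ m) (hg : Int.gcd a m = 1) :
    find_reverse a m = pvModinv a m := by
  obtain ⟨h0, hlt, hmod⟩ := pvModinv_spec a m hm hg
  have hmpos : (0 : Int) < m := by omega
  obtain ⟨q1, q2, q3⟩ := pvFindRevGo_le a m (m.toNat + 1) 0 (pvModinv a m) h0 (by omega) hmod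
  rw [find_reverse]
  set r := pvFindRevGo a m (m.toNat + 1) 0 with hrdef
  have hr1 : (r * a) % m = 1 := by rwa [PySem.Int.mod_eq_emod_of_pos hmpos] at q1
  have hr2 : (pvModinv a m * a) % m = 1 := by rwa [PySem.Int.mod_eq_emod_of_pos hmpos] at hmod
  have hdvd : m ∣ (r - pvModinv a m) * a := by
    apply Int.dvd_of_emod_eq_zero
    have e : (r - pvModinv a m) * a = r * a - pvModinv a m * a := by ring
    rw [e, Int.sub_emod, hr1, hr2]
    simp
  have hcop : IsCoprime (m : Int) a := by
    rw [Int.isCoprime_iff_gcd_eq_one, Int.gcd_comm]; exact hg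
  have hdvd2 : m ∣ (r - pvModinv a m) := IsCoprime.dvd_of_dvd_mul_right hcop hdvd
  rcases hdvd2 with ⟨k, hk⟩
  have hb1 : r < m := by omega
  have hk0 : k = 0 := by nlinarith
  rw [hk0, mul_zero] at hk
  omega

-- per-character output equality
lemma pvChar_eq (al : List Char) (a b : Int) (c : Char) (hm : 2 ≤ (al.length : Int))
    (hg : Int.gcd a (al.length : Int) = 1) :
    (if PySem.Chars.find al [c] ≠ -1 then
        [PySem.List.pyGetD al (PySem.Int.mod (find_reverse a (al.length : Int) * (PySem.Chars.find al [c] - b)) (al.length : Int)) ' ']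
      else [c]) =
    (match (pvIndexDict al).get? c with
      | none => [c]
      | some j => [PySem.List.pyGetD al (PySem.Int.mod (pvModinv a (al.length : Int) * (j - b)) (al.length : Int)) ' ']) := by
  rw [pvIndexDict_get?, find_singleton_eq]
  cases h : pvIdx c al with
  | none => simp
  | some k =>
    simp only [Option.map_some]
    have hne : ((k : Int) ≠ -1) := by omega
    rw [if_pos hne, find_reverse_eq_pvModinv a _ hm hg]
    simp

-- the tail of the loop (indices ≥ 2): same quads, outputs related by flatten
lemma pvTail_eq (s al : List Char) (hm : 2 ≤ (al.length : Int)) :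
    ∀ (L : List Int), (∀ i ∈ L, ¬ i = 0 ∧ ¬ i = 1) →
    ∀ (A1 A2 B1 B2 : Int) (ansA : List Char) (outB : List (List Char)),
    Int.gcd A1 (al.length : Int) = 1 → Int.gcd A2 (al.length : Int) = 1 →
    ansA = outB.flatten →
    (L.foldl (pvStepA s al) ((A1, A2, B1, B2), ansA)).2 =
      ((L.foldl (pvStepB s al (pvIndexDict al)) ((A1, A2, B1, B2), outB)).2).flatten := by
  intro L
  induction L with
  | nil => intro _ A1 A2 B1 B2 ansA outB _ _ hrel; simpa using hrel
  | cons i L ih =>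
    intro hL A1 A2 B1 B2 ansA outB h1 h2 hrel
    obtain ⟨hi0, hi1⟩ := hL i (List.mem_cons_self)
    simp only [List.foldl_cons]
    have ha : Int.gcd (PySem.Int.mod (A1 * A2) (al.length : Int)) (al.length : Int) = 1 := by
      rw [pvGcd_mod _ _ (by omega)]
      exact pvGcd_mul _ _ _ h1 h2
    have hstepA : pvStepA s al ((A1, A2, B1, B2), ansA) i =
        ((A2, PySem.Int.mod (A1 * A2) (al.length : Int), B2, PySem.Int.mod (B1 + B2) (al.length : Int)),
          ansA ++ (if PySem.Chars.find al [PySem.List.pyGetD s i ' '] ≠ -1 then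
              [PySem.List.pyGetD al (PySem.Int.mod (find_reverse (PySem.Int.mod (A1 * A2) (al.length : Int)) (al.length : Int) * (PySem.Chars.find al [PySem.List.pyGetD s i ' '] - PySem.Int.mod (B1 + B2) (al.length : Int))) (al.length : Int)) ' ']
            else [PySem.List.pyGetD s i ' '])) := by
      simp only [pvStepA, hi0, hi1, if_false]
      split <;> simp_all
    have hstepB : pvStepB s al (pvIndexDict al) ((A1, A2, B1, B2), outB) i =
        ((A2, PySem.Int.mod (A1 * A2) (al.length : Int), B2, PySem.Int.mod (B1 + B2) (al.length : Int)),
          outB ++ [(match (pvIndexDict al).get? (PySem.List.pyGetD s i ' ') with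
            | none => [PySem.List.pyGetD s i ' ']
            | some j => [PySem.List.pyGetD al (PySem.Int.mod (pvModinv (PySem.Int.mod (A1 * A2) (al.length : Int)) (al.length : Int) * (j - PySem.Int.mod (B1 + B2) (al.length : Int))) (al.length : Int)) ' '])]) := by
      simp only [pvStepB, hi0, hi1, if_false]
      split <;> simp_all
    rw [hstepA, hstepB]
    apply ih (fun j hj => hL j (List.mem_cons_of_mem _ hj)) _ _ _ _ _ _ h2 ha
    rw [List.flatten_append, List.flatten_cons, List.flatten_nil, List.append_nil, hrel]
    congr 1
    exact pvChar_eq al (PySem.Int.mod (A1 * A2) (al.length : Int)) (PySem.Int.mod (B1 + B2) (al.length : Int))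
      (PySem.List.pyGetD s i ' ') hm ha

-- steps 0 and 1: the key pair is taken from the unchanged state
lemma pvStep0_eq (s al : List Char) (hm : 2 ≤ (al.length : Int)) (i : Int)
    (A1 A2 B1 B2 : Int) (ansA : List Char) (outB : List (List Char))
    (hi : i = 0 ∨ i = 1)
    (hg : Int.gcd (if i = 0 then A1 else A2) (al.length : Int) = 1) :
    ∃ piece, pvStepA s al ((A1, A2, B1, B2), ansA) i = ((A1, A2, B1, B2), ansA ++ piece) ∧
      pvStepB s al (pvIndexDict al) ((A1, A2, B1, B2), outB) i = ((A1, A2, B1, B2), outB ++ [piece]) := by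
  rcases hi with rfl | rfl
  · simp only [if_pos rfl] at hg
    refine ⟨(if PySem.Chars.find al [PySem.List.pyGetD s 0 ' '] ≠ -1 then
        [PySem.List.pyGetD al (PySem.Int.mod (find_reverse A1 (al.length : Int) * (PySem.Chars.find al [PySem.List.pyGetD s 0 ' '] - B1)) (al.length : Int)) ' ']
      else [PySem.List.pyGetD s 0 ' ']), ?_, ?_⟩
    · simp only [pvStepA]
      norm_num
      split <;> rfl
    · simp only [pvStepB]
      norm_num
      have hc := pvChar_eq al A1 B1 (PySem.List.pyGetD s 0 ' ') hm hg
      rw [ite_not] at hc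
      cases hq : (pvIndexDict al).get? (PySem.List.pyGetD s 0 ' ') with
      | none => rw [hq] at hc; simp [hc]
      | some j => rw [hq] at hc; simp [hc]
  · simp only [if_neg (by norm_num : (1:Int) ≠ 0)] at hg
    refine ⟨(if PySem.Chars.find al [PySem.List.pyGetD s 1 ' '] ≠ -1 then
        [PySem.List.pyGetD al (PySem.Int.mod (find_reverse A2 (al.length : Int) * (PySem.Chars.find al [PySem.List.pyGetD s 1 ' '] - B2)) (al.length : Int)) ' ']
      else [PySem.List.pyGetD s 1 ' ']), ?_, ?_⟩
    · simp only [pvStepA]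
      norm_num
      split <;> rfl
    · simp only [pvStepB]
      norm_num
      have hc := pvChar_eq al A2 B2 (PySem.List.pyGetD s 1 ' ') hm hg
      rw [ite_not] at hc
      cases hq : (pvIndexDict al).get? (PySem.List.pyGetD s 1 ' ') with
      | none => rw [hq] at hc; simp [hc]
      | some j => rw [hq] at hc; simp [hc]

-- the whole loop, at the list level
lemma pvMain (s al : List Char) (a1 a2 b1 b2 : Int)
    (hm : 2 ≤ (al.length : Int)) (hg1 : Int.gcd a1 (al.length : Int) = 1)
    (hg2 : 2 ≤ s.length → Int.gcd a2 (al.length : Int) = 1) :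
    ((PySem.List.pyRange 0 (s.length : Int) 1).foldl (pvStepA s al) ((a1, a2, b1, b2), [])).2 =
      (((PySem.List.pyRange 0 (s.length : Int) 1).foldl (pvStepB s al (pvIndexDict al)) ((a1, a2, b1, b2), [])).2).flatten := by
  by_cases h0 : s.length = 0
  · rw [h0]; rfl
  · have hc0 : (0 : Int) < (s.length : Int) := by omega
    rw [PySem.List.pyRange_one_cons hc0]
    simp only [List.foldl_cons]
    obtain ⟨p0, hA0, hB0⟩ := pvStep0_eq s al hm 0 a1 a2 b1 b2 [] [] (Or.inl rfl) (by simpa using hg1)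
    rw [hA0, hB0]
    by_cases h1 : s.length = 1
    · have hnil : PySem.List.pyRange (0 + 1) ((s.length : Nat) : Int) 1 = [] := by
        rw [h1]; rfl
      rw [hnil]
      simp
    · have h2 : 2 ≤ s.length := by omega
      have hc1 : (0 + 1 : Int) < (s.length : Int) := by omega
      rw [PySem.List.pyRange_one_cons hc1]
      simp only [List.foldl_cons]
      obtain ⟨p1, hA1, hB1⟩ := pvStep0_eq s al hm 1 a1 a2 b1 b2 ([] ++ p0) ([] ++ [p0])
        (Or.inr rfl) (by simpa using hg2 h2)
      rw [show (0 + 1 : Int) = 1 by norm_num] at *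
      rw [hA1, hB1]
      apply pvTail_eq s al hm _ ?_ _ _ _ _ _ _ hg1 (hg2 h2) ?_
      · intro i hi
        rw [PySem.List.mem_pyRange_one] at hi
        constructor <;> omega
      · simp

-- ===== VERDICT (by name: the statement is the Claim_ definition above) =====
theorem req_afin_decode_spec : Claim_equal_req_afin_decode := by
  intro phrase a1 a2 b1 b2 alphabet _hdom hpre
  unfold Spec_req_afin_decode
  simp only [req_afin_decode, req_afin_decode_alt]
  rcases hpre with hemp | ⟨hm, hg1, hg2⟩
  · rw [hemp]; rfl
  · exact congrArg String.mk
      (pvMain phrase.toList alphabet.toList a1 a2 b1 b2 (by exact_mod_cast hm) hg1 hg2)
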